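-- pv_equiv track=rewrite | github.com/mmerah/ai-gamemaster | app/domain/campaigns/factories.py | _merge_content_packs
-- ===== SOURCE A (Python) =====
-- from typing import Dict, List, Optional
--
-- def _merge_content_packs(
--
--     campaign_packs: List[str],
--     character_packs: List[List[str]],
-- ) -> List[str]:
--     """Merge content packs from campaign template and character templates.
--
--     The priority order is:
--     1. Campaign template content packs (highest priority)
--     2. Character template content packs (in order they appear)
--     3. System default (dnd_5e_srd) if not already included
--
--     Args:
--         campaign_packs: Content pack IDs from the campaign template
--         character_packs: List of content pack IDs from each character template
--
--     Returns:
--         Merged list of content pack IDs in priority order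
--     """
--     merged_packs: List[str] = []
--     seen_packs = set()
--
--     # Add campaign packs first (highest priority)
--     for pack_id in campaign_packs:
--         if pack_id not in seen_packs:
--             merged_packs.append(pack_id)
--             seen_packs.add(pack_id)
--
--     # Add character packs
--     for char_packs in character_packs:
--         for pack_id in char_packs:
--             if pack_id not in seen_packs:
--                 merged_packs.append(pack_id)
--                 seen_packs.add(pack_id)
--
--     # Ensure dnd_5e_srd is always included as a fallback
--     if "dnd_5e_srd" not in seen_packs:
--         merged_packs.append("dnd_5e_srd")
--
--     return merged_packs
-- ===== SOURCE B (Python) =====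
-- from typing import List
--
--
-- def _merge_content_packs(
--     campaign_packs: List[str],
--     character_packs: List[List[str]],
-- ) -> List[str]:
--     """Merge content pack IDs in priority order, keeping first occurrences only.
--
--     Builds the full priority-ordered sequence (campaign packs, then each
--     character template's packs, then the system fallback) and keeps an
--     element exactly when it does not appear earlier in that sequence.
--     """
--     full = list(campaign_packs)
--     for packs in character_packs:
--         full.extend(packs)
--     full.append("dnd_5e_srd")
--     return [x for i, x in enumerate(full) if x not in full[:i]]
-- ===== Notes on version B (the rewrite author's own statement) =====
-- stated objective: alternative
-- what changed: Replaces A's seen-set accumulator and fallback branch with a two-stage positional algorithm: concatenate all ids (fallback unconditionally last), then keep position i exactly when the id does not occur in the prefix full[:i] (a first-occurrence filter with no auxiliary state).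
import Mathlib
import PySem

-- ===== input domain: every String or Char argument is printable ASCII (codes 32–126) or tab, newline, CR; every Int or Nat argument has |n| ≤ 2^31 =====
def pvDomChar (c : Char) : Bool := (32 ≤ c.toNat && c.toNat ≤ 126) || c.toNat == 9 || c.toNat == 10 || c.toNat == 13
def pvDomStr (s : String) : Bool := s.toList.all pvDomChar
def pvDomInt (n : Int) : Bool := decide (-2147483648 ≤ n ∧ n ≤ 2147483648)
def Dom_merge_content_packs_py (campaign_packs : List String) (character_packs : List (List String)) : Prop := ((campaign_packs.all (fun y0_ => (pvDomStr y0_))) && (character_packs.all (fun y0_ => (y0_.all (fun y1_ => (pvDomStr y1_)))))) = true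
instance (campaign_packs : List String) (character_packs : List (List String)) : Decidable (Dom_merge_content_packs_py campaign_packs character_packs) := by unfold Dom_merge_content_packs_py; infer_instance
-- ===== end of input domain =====

-- ===== PORT A =====
-- B replaces A's seen-set accumulator and fallback branch with a two-stage
-- positional algorithm: concatenate everything (fallback last), then keep
-- position i iff the id is absent from the prefix before i (objective: alternative).
def mcpStep (st : List String × PySem.Set String) (pack_id : String) :
    List String × PySem.Set String :=
  if PySem.Set.contains st.2 pack_id then st
  else (st.1 ++ [pack_id], PySem.Set.add st.2 pack_id)

def merge_content_packs_py (campaign_packs : List String)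
    (character_packs : List (List String)) : List String :=
  let st0 : List String × PySem.Set String := ([], PySem.Set.empty)
  let st1 := campaign_packs.foldl mcpStep st0
  let st2 := character_packs.foldl (fun st char_packs => char_packs.foldl mcpStep st) st1
  if PySem.Set.contains st2.2 "dnd_5e_srd" then st2.1 else st2.1 ++ ["dnd_5e_srd"]

-- ===== PORT B =====
def merge_content_packs_py_alt (campaign_packs : List String)
    (character_packs : List (List String)) : List String :=
  let full := (character_packs.foldl (fun acc packs => acc ++ packs) campaign_packs)
                ++ ["dnd_5e_srd"]
  ((PySem.List.enumerate full 0).filter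
      (fun p => !(PySem.List.slice full none (some p.1)).contains p.2)).map Prod.snd

-- ===== PRECONDITION & SPEC =====
def Spec_merge_content_packs_py (campaign_packs : List String) (character_packs : List (List String)) (out : List String) : Prop := out = merge_content_packs_py_alt campaign_packs character_packs
instance (campaign_packs : List String) (character_packs : List (List String)) (out : List String) : Decidable (Spec_merge_content_packs_py campaign_packs character_packs out) := by unfold Spec_merge_content_packs_py; infer_instance

-- ===== CLAIM =====
def Claim_equal_merge_content_packs_py : Prop := ∀ (campaign_packs : List String) (character_packs : List (List String)), Dom_merge_content_packs_py campaign_packs character_packs → Spec_merge_content_packs_py campaign_packs character_packs (merge_content_packs_py campaign_packs character_packs)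

-- ===== LEMMAS AND PROOFS =====
-- A's loop body keeps merged-list and seen-set equal.
theorem mcpStep_diag (s : PySem.Set String) (x : String) :
    mcpStep (s, s) x = (PySem.Set.add s x, PySem.Set.add s x) := by
  simp only [mcpStep, PySem.Set.add]
  split <;> rfl

theorem foldl_mcpStep_diag (l : List String) (s : PySem.Set String) :
    l.foldl mcpStep (s, s) = (PySem.Set.update s l, PySem.Set.update s l) := by
  induction l generalizing s with
  | nil => rfl
  | cons x xs ih => simp [mcpStep_diag, ih, PySem.Set.update]

theorem foldl2_mcpStep_diag (ls : List (List String)) (s : PySem.Set String) :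
    ls.foldl (fun st ch => ch.foldl mcpStep st) (s, s)
      = (PySem.Set.update s ls.flatten, PySem.Set.update s ls.flatten) := by
  induction ls generalizing s with
  | nil => rfl
  | cons c cs ih => simp [foldl_mcpStep_diag, ih, PySem.Set.update, List.foldl_append]

-- B-side: concatenation loop builds campaign ++ flatten.
theorem foldl_append_flatten (ls : List (List String)) (acc : List String) :
    ls.foldl (fun acc packs => acc ++ packs) acc = acc ++ ls.flatten := by
  induction ls generalizing acc with
  | nil => simp
  | cons c cs ih => simp [ih]

-- Recursive form of B's first-occurrence filter (proof helper).
def firstOcc (pre : List String) : List String → List String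
  | [] => []
  | x :: xs =>
      if pre.contains x then firstOcc (pre ++ [x]) xs
      else x :: firstOcc (pre ++ [x]) xs

theorem enumFilter_eq_firstOcc (l pre : List String) :
    ((PySem.List.enumerate l (pre.length : Int)).filter
        (fun p => !((pre ++ l).take p.1.toNat).contains p.2)).map Prod.snd
      = firstOcc pre l := by
  induction l generalizing pre with
  | nil => simp [PySem.List.enumerate_nil, firstOcc]
  | cons x xs ih =>
      rw [PySem.List.enumerate_cons, List.filter_cons]
      have htake : List.take ((pre.length : Int)).toNat (pre ++ x :: xs) = pre := by
        simp [List.take_left']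
      simp only [htake]
      have hre : pre ++ x :: xs = (pre ++ [x]) ++ xs := by simp
      have hlen : ((pre.length : Int) + 1) = (((pre ++ [x]).length : Nat) : Int) := by
        push_cast [List.length_append, List.length_singleton]; ring
      rw [hre, hlen]
      by_cases h : pre.contains x
      · simp only [h, Bool.not_true, Bool.false_eq_true, if_false]
        rw [ih (pre ++ [x])]
        simp only [List.contains_iff_mem] at h
        simp [firstOcc, h]
      · simp only [h, Bool.not_false, if_true, List.map_cons]
        rw [ih (pre ++ [x])]
        simp only [List.contains_iff_mem] at h
        simp [firstOcc, h]

theorem update_eq_append_firstOcc (l : List String) (pre : List String)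
    (s : PySem.Set String) (h : ∀ x, x ∈ s ↔ x ∈ pre) :
    PySem.Set.update s l = s ++ firstOcc pre l := by
  induction l generalizing pre s with
  | nil => simp [PySem.Set.update, firstOcc]
  | cons x xs ih =>
      have hstep : PySem.Set.update s (x :: xs) = PySem.Set.update (PySem.Set.add s x) xs := by
        simp [PySem.Set.update]
      rw [hstep]
      by_cases hx : x ∈ pre
      · have hadd : PySem.Set.add s x = s := by
          have hs := (h x).2 hx
          simp [PySem.Set.add, PySem.Set.contains, hs]
        rw [hadd, ih (pre ++ [x]) s (by
          intro y; by_cases hy : y = x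
          · subst hy; simp [(h y).2 hx, hx]
          · simp [List.mem_append, h y, hy])]
        simp [firstOcc, hx]
      · have hadd : PySem.Set.add s x = s ++ [x] := by
          have hs : x ∉ s := fun hc => hx ((h x).1 hc)
          simp [PySem.Set.add, PySem.Set.contains, hs]
        rw [hadd, ih (pre ++ [x]) (s ++ [x]) (by
          intro y; by_cases hy : y = x
          · subst hy; simp
          · simp [List.mem_append, h y, hy])]
        simp [firstOcc, hx]

theorem alt_eq_ofList (full : List String) :
    ((PySem.List.enumerate full 0).filter
        (fun p => !(PySem.List.slice full none (some p.1)).contains p.2)).map Prod.snd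
      = PySem.Set.ofList full := by
  have hfil : (PySem.List.enumerate full 0).filter
        (fun p => !(PySem.List.slice full none (some p.1)).contains p.2)
      = (PySem.List.enumerate full 0).filter
        (fun p => !(full.take p.1.toNat).contains p.2) := by
    apply List.filter_congr
    intro p hp
    obtain ⟨k, hk, rfl⟩ := (PySem.List.mem_enumerate_iff _ _ _).1 hp
    simp [PySem.List.slice_to]
  rw [hfil]
  have := enumFilter_eq_firstOcc full []
  simp only [List.nil_append, List.length_nil, Nat.cast_zero] at this
  rw [this]
  have := update_eq_append_firstOcc full [] PySem.Set.empty (by intro x; simp [PySem.Set.empty])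
  simp only [PySem.Set.empty, List.nil_append] at this
  rw [← this, PySem.Set.ofList_eq_foldl]
  rfl

-- ===== VERDICT =====
theorem merge_content_packs_py_spec : Claim_equal_merge_content_packs_py := by
  intro cp chp _
  show _ = _
  simp only [merge_content_packs_py, merge_content_packs_py_alt,
    foldl_append_flatten, alt_eq_ofList, PySem.Set.empty,
    foldl_mcpStep_diag, foldl2_mcpStep_diag,
    PySem.Set.ofList, PySem.Set.update, List.foldl_append, List.foldl_cons,
    List.foldl_nil, PySem.Set.add]
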